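-- pv_equiv track=rewrite | github.com/dailypartita/cn_cdc_crawl | extract_data_from_md.py | all_pipe_tables
-- ===== SOURCE A (Python) =====
-- from typing import List, Optional, Dict, Any, Tuple
--
-- def all_pipe_tables(md: str) -> List[Tuple[int,int,str]]:
--     out = []
--     lines = md.splitlines()
--     i = 0
--     while i < len(lines):
--         if lines[i].strip().startswith("|"):
--             j = i; buf = []
--             while j < len(lines) and lines[j].strip().startswith("|"):
--                 buf.append(lines[j]); j += 1
--             if len(buf) >= 2:
--                 out.append((i, j, "\n".join(buf)))
--             i = j
--         else:
--             i += 1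
--     return out
-- ===== SOURCE B (Python) =====
-- def all_pipe_tables(md):
--     lines = md.splitlines()
--     out = []
--     start = None
--     # single flat pass (state machine) with a sentinel index closing a trailing run
--     for k in range(len(lines) + 1):
--         f = k < len(lines) and lines[k].strip().startswith("|")
--         if f and start is None:
--             start = k
--         elif not f and start is not None:
--             if k - start >= 2:
--                 out.append((start, k, "\n".join(lines[start:k])))
--             start = None
--     return out
-- ===== Notes on version B (the rewrite author's own statement) =====
-- stated objective: simpler
-- what changed: Replaces the nested while-loop scan (outer cursor plus inner run-collecting loop with buffer) by one flat state-machine pass over the line indices plus a sentinel, keeping only an optional run-start index and emitting a table when a run closes.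
import Mathlib
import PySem

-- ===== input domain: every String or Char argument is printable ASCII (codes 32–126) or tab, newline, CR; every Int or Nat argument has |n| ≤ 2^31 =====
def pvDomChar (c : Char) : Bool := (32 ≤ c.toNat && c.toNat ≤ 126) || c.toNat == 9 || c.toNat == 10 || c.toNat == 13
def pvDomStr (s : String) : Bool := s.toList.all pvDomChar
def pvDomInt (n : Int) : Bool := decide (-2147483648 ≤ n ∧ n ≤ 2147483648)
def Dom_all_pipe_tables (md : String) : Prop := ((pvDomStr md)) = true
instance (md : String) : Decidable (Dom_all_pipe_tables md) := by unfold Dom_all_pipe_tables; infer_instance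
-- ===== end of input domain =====

-- B replaces A's nested while-loop scan by one flat state-machine pass with an optional run-start (simpler decomposition, same O(n) cost).


-- ===== PORT A =====
-- lines[i].strip().startswith("|")
def pvIsPipe (s : String) : Bool := PySem.Str.startswith (PySem.Str.strip s) "|"

-- inner while: collect the run starting at j (fuel = an upper bound on the remaining iterations, only to make the loop structural)
def pvInnerA (lines : List String) : Nat → Nat → List String → Nat × List String
  | 0, j, buf => (j, buf)
  | fuel + 1, j, buf =>
    if _h : j < lines.length then
      if pvIsPipe lines[j] then pvInnerA lines fuel (j + 1) (buf ++ [lines[j]]) else (j, buf)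
    else (j, buf)

-- outer while over i (fuel bounds the iteration count; i advances by at least 1 per step)
def pvOuterA (lines : List String) : Nat → Nat → List (Int × Int × String) → List (Int × Int × String)
  | 0, _, out => out
  | fuel + 1, i, out =>
    if _h : i < lines.length then
      if pvIsPipe lines[i] then
        let r := pvInnerA lines lines.length i []
        let out' := if r.2.length ≥ 2 then
            out ++ [((i : Int), (r.1 : Int), PySem.Str.join "\n" r.2)] else out
        pvOuterA lines fuel r.1 out'
      else pvOuterA lines fuel (i + 1) out
    else out

def all_pipe_tables (md : String) : List (Int × Int × String) :=
  pvOuterA (PySem.Str.splitlines md) (PySem.Str.splitlines md).length 0 []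

-- ===== PORT B =====
-- f = k < len(lines) and lines[k].strip().startswith("|")
def pvFlagB (lines : List String) (k : Int) : Bool :=
  decide (k < (lines.length : Int)) && pvIsPipe (PySem.List.pyGetD lines k "")

-- one loop-body step of B's state machine; state = (out, start)
def pvStepB (lines : List String)
    (st : List (Int × Int × String) × Option Int) (k : Int) :
    List (Int × Int × String) × Option Int :=
  let f := pvFlagB lines k
  match st with
  | (out, none) => if f then (out, some k) else (out, none)
  | (out, some s) =>
    if f then (out, some s)
    else
      ((if k - s ≥ 2 then
          out ++ [(s, k, PySem.Str.join "\n" (PySem.List.slice lines (some s) (some k)))]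
        else out), none)

def all_pipe_tables_alt (md : String) : List (Int × Int × String) :=
  let lines := PySem.Str.splitlines md
  ((PySem.List.pyRange 0 ((lines.length : Int) + 1) 1).foldl (pvStepB lines) ([], none)).1

-- ===== PRECONDITION & SPEC =====
def Spec_all_pipe_tables (md : String) (out : List (Int × Int × String)) : Prop := out = all_pipe_tables_alt md
instance (md : String) (out : List (Int × Int × String)) : Decidable (Spec_all_pipe_tables md out) := by unfold Spec_all_pipe_tables; infer_instance

-- ===== CLAIM (what is proved, stated in full; the proofs are below) =====
def Claim_equal_all_pipe_tables : Prop := ∀ (md : String), Dom_all_pipe_tables md → Spec_all_pipe_tables md (all_pipe_tables md)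

-- ===== LEMMAS AND PROOFS =====

-- flag helpers
theorem pvFlagB_lt (lines : List String) (k : Nat) (h : k < lines.length) :
    pvFlagB lines (k : Int) = pvIsPipe lines[k] := by
  unfold pvFlagB
  rw [PySem.List.pyGetD_eq_getElem lines "" (by omega) (by exact_mod_cast h)]
  simp [h]

theorem pvFlagB_ge (lines : List String) (k : Int) (h : (lines.length : Int) ≤ k) :
    pvFlagB lines k = false := by
  unfold pvFlagB
  have : ¬ (k < (lines.length : Int)) := by omega
  simp [this]

theorem pvTakeExtend (lines : List String) (s j : Nat) (hs : s ≤ j) (hj : j < lines.length) :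
    (lines.drop s).take (j - s) ++ [lines[j]] = (lines.drop s).take (j + 1 - s) := by
  have h1 : j + 1 - s = (j - s) + 1 := by omega
  rw [h1, List.take_add_one]
  rw [List.getElem?_drop]
  have h2 : s + (j - s) = j := by omega
  rw [h2, List.getElem?_eq_getElem hj]
  rfl

theorem pvBufLen (lines : List String) (s j : Nat) (_hs : s ≤ j) (hj : j ≤ lines.length) :
    ((lines.drop s).take (j - s)).length = j - s := by
  simp [List.length_take, List.length_drop]; omega

-- pvInnerA does not depend on the fuel as long as the fuel is sufficient
theorem pvInnerA_eq_of_le (lines : List String) (f1 f2 j : Nat) (buf : List String)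
    (h1 : lines.length - j ≤ f1) (h2 : lines.length - j ≤ f2) :
    pvInnerA lines f1 j buf = pvInnerA lines f2 j buf := by
  induction f1 generalizing f2 j buf with
  | zero =>
      have hj : ¬ j < lines.length := by omega
      cases f2 with
      | zero => rfl
      | succ f2 =>
          show (j, buf) = pvInnerA lines (f2 + 1) j buf
          rw [pvInnerA]; simp [hj]
  | succ f1 ih =>
      cases f2 with
      | zero =>
          have hj : ¬ j < lines.length := by omega
          show pvInnerA lines (f1 + 1) j buf = (j, buf)
          rw [pvInnerA]; simp [hj]
      | succ f2 =>
          rw [pvInnerA, pvInnerA]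
          by_cases h : j < lines.length
          · simp only [h, ↓reduceDIte]
            by_cases hp : pvIsPipe lines[j] = true
            · simp only [hp, ↓reduceIte]
              exact ih f2 (j + 1) (buf ++ [lines[j]]) (by omega) (by omega)
            · have hpf : pvIsPipe lines[j] = false := by simpa using hp
              simp only [hpf, Bool.false_eq_true, ↓reduceIte]
          · simp only [h, ↓reduceDIte]

theorem pvInnerA_spec (lines : List String) (fuel j : Nat) (buf : List String)
    (hf : lines.length - j ≤ fuel) (hj : j ≤ lines.length) :
    j ≤ (pvInnerA lines fuel j buf).1 ∧ (pvInnerA lines fuel j buf).1 ≤ lines.length ∧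
    (∀ (h : (pvInnerA lines fuel j buf).1 < lines.length),
        pvIsPipe lines[(pvInnerA lines fuel j buf).1] = false) := by
  induction fuel generalizing j buf with
  | zero =>
      have h : ¬ j < lines.length := by omega
      rw [pvInnerA]
      exact ⟨le_refl _, hj, fun hh => absurd hh h⟩
  | succ fuel ih =>
      rw [pvInnerA]
      by_cases h : j < lines.length
      · by_cases hp : pvIsPipe lines[j] = true
        · simp only [h, ↓reduceDIte, hp, ↓reduceIte]
          have := ih (j + 1) (buf ++ [lines[j]]) (by omega) (by omega)
          exact ⟨by omega, this.2.1, this.2.2⟩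
        · have hpf : pvIsPipe lines[j] = false := by simpa using hp
          simp only [h, ↓reduceDIte, hpf, Bool.false_eq_true, ↓reduceIte]
          exact ⟨le_refl _, by omega, fun _ => trivial⟩
      · simp only [h, ↓reduceDIte]
        exact ⟨le_refl _, by omega, fun hh => hh.elim⟩

theorem pvFoldB_some (lines : List String) (fuel j s : Nat) (buf : List String)
    (out : List (Int × Int × String))
    (hf : lines.length - j ≤ fuel)
    (hs : s ≤ j) (hj : j ≤ lines.length)
    (hbuf : buf = (lines.drop s).take (j - s)) :
    ((PySem.List.pyRange (j : Int) ((lines.length : Int) + 1) 1).foldl (pvStepB lines)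
        (out, some (s : Int))).1 =
    ((PySem.List.pyRange (((pvInnerA lines fuel j buf).1 : Int) + 1) ((lines.length : Int) + 1) 1).foldl
        (pvStepB lines)
        ((if (pvInnerA lines fuel j buf).2.length ≥ 2 then
            out ++ [((s : Int), ((pvInnerA lines fuel j buf).1 : Int),
                     PySem.Str.join "\n" (pvInnerA lines fuel j buf).2)]
          else out), none)).1 := by
  induction fuel generalizing j buf with
  | zero =>
      have hjn : j = lines.length := by omega
      subst hjn
      rw [PySem.List.pyRange_one_cons (by omega : ((lines.length : Nat) : Int) < (lines.length : Int) + 1)]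
      rw [List.foldl_cons]
      have hflag : pvFlagB lines ((lines.length : Nat) : Int) = false :=
        pvFlagB_ge lines _ (le_refl _)
      have hlen : buf.length = lines.length - s := by
        rw [hbuf]; exact pvBufLen lines s lines.length hs (le_refl _)
      have hst : pvStepB lines (out, some (s : Int)) ((lines.length : Nat) : Int) =
          ((if buf.length ≥ 2 then
              out ++ [((s : Int), ((lines.length : Nat) : Int), PySem.Str.join "\n" buf)] else out), none) := by
        simp only [pvStepB, hflag, Bool.false_eq_true, ↓reduceIte]
        rw [PySem.List.slice_natCast, ← hbuf]
        split_ifs with h1 h2 <;> first | rfl | (exfalso; omega)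
      rw [hst]
      rfl
  | succ fuel ih =>
      rw [pvInnerA]
      by_cases h : j < lines.length
      · by_cases hp : pvIsPipe lines[j] = true
        · simp only [h, ↓reduceDIte, hp, ↓reduceIte]
          rw [PySem.List.pyRange_one_cons (by exact_mod_cast by omega : (j : Int) < (lines.length : Int) + 1)]
          rw [List.foldl_cons]
          have hst : pvStepB lines (out, some (s : Int)) (j : Int) = (out, some (s : Int)) := by
            simp [pvStepB, pvFlagB_lt lines j h, hp]
          rw [hst]
          have hcast : (j : Int) + 1 = ((j + 1 : Nat) : Int) := by push_cast; ring
          rw [hcast]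
          exact ih (j + 1) (buf ++ [lines[j]]) (by omega) (by omega) (by omega)
            (by rw [hbuf, pvTakeExtend lines s j hs h])
        · have hpf : pvIsPipe lines[j] = false := by simpa using hp
          simp only [h, ↓reduceDIte, hpf, Bool.false_eq_true, ↓reduceIte]
          rw [PySem.List.pyRange_one_cons (by exact_mod_cast by omega : (j : Int) < (lines.length : Int) + 1)]
          rw [List.foldl_cons]
          have hlen : buf.length = j - s := by rw [hbuf]; exact pvBufLen lines s j hs hj
          have hst : pvStepB lines (out, some (s : Int)) (j : Int) =
              ((if buf.length ≥ 2 then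
                  out ++ [((s : Int), (j : Int), PySem.Str.join "\n" buf)] else out), none) := by
            simp only [pvStepB, pvFlagB_lt lines j h, hpf, Bool.false_eq_true, ↓reduceIte]
            rw [PySem.List.slice_natCast, ← hbuf]
            split_ifs with h1 h2 <;> first | rfl | (exfalso; omega)
          rw [hst]
      · have hjn : j = lines.length := by omega
        subst hjn
        simp only [lt_irrefl, ↓reduceDIte]
        rw [PySem.List.pyRange_one_cons (by omega : ((lines.length : Nat) : Int) < (lines.length : Int) + 1)]
        rw [List.foldl_cons]
        have hflag : pvFlagB lines ((lines.length : Nat) : Int) = false :=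
          pvFlagB_ge lines _ (le_refl _)
        have hlen : buf.length = lines.length - s := by
          rw [hbuf]; exact pvBufLen lines s lines.length hs (le_refl _)
        have hst : pvStepB lines (out, some (s : Int)) ((lines.length : Nat) : Int) =
            ((if buf.length ≥ 2 then
                out ++ [((s : Int), ((lines.length : Nat) : Int), PySem.Str.join "\n" buf)] else out), none) := by
          simp only [pvStepB, hflag, Bool.false_eq_true, ↓reduceIte]
          rw [PySem.List.slice_natCast, ← hbuf]
          split_ifs with h1 h2 <;> first | rfl | (exfalso; omega)
        rw [hst]

theorem pvMain (lines : List String) (d i : Nat) (out : List (Int × Int × String))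
    (hd : lines.length - i ≤ d) (hi : i ≤ lines.length) :
    pvOuterA lines d i out =
    ((PySem.List.pyRange (i : Int) ((lines.length : Int) + 1) 1).foldl (pvStepB lines)
        (out, none)).1 := by
  induction d generalizing i out with
  | zero =>
      have hin : i = lines.length := by omega
      subst hin
      rw [PySem.List.pyRange_one_cons (by omega : ((lines.length : Nat) : Int) < (lines.length : Int) + 1)]
      rw [List.foldl_cons]
      have hflag : pvFlagB lines ((lines.length : Nat) : Int) = false :=
        pvFlagB_ge lines _ (le_refl _)
      have hst : pvStepB lines (out, none) ((lines.length : Nat) : Int) = (out, none) := by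
        simp [pvStepB, hflag]
      rw [hst, PySem.List.pyRange_one_eq_nil (by omega), List.foldl_nil]
      rfl
  | succ d ih =>
      by_cases hlt : i < lines.length
      · by_cases hp : pvIsPipe lines[i] = true
        · rw [pvOuterA]; simp only [hlt, ↓reduceDIte, hp, ↓reduceIte]
          have hfe : pvInnerA lines lines.length i [] =
              pvInnerA lines ((lines.length - (i + 1)) + 1) i [] :=
            pvInnerA_eq_of_le lines _ _ _ _ (by omega) (by omega)
          rw [hfe, pvInnerA]
          simp only [hlt, ↓reduceDIte, hp, ↓reduceIte, List.nil_append]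
          rw [PySem.List.pyRange_one_cons (by exact_mod_cast by omega : (i : Int) < (lines.length : Int) + 1)]
          rw [List.foldl_cons]
          have hst : pvStepB lines (out, none) (i : Int) = (out, some (i : Int)) := by
            simp [pvStepB, pvFlagB_lt lines i hlt, hp]
          rw [hst]
          have hcast : (i : Int) + 1 = ((i + 1 : Nat) : Int) := by push_cast; ring
          rw [hcast]
          have hbuf1 : [lines[i]] = (lines.drop i).take (i + 1 - i) := by
            have h2 : i + 1 - i = 1 := by omega
            rw [h2]
            have h3 := pvTakeExtend lines i i (le_refl i) hlt
            simpa using h3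
          rw [pvFoldB_some lines (lines.length - (i + 1)) (i + 1) i [lines[i]] out
              (by omega) (by omega) (by omega) hbuf1]
          obtain ⟨hr1, hr2, hr3⟩ :=
            pvInnerA_spec lines (lines.length - (i + 1)) (i + 1) [lines[i]] (by omega) (by omega)
          set r := pvInnerA lines (lines.length - (i + 1)) (i + 1) [lines[i]] with hr
          rw [ih r.1 _ (by omega : lines.length - r.1 ≤ d) hr2]
          rw [PySem.List.pyRange_one_cons (by exact_mod_cast by omega : ((r.1 : Nat) : Int) < (lines.length : Int) + 1)]
          rw [List.foldl_cons]
          have hf : pvFlagB lines (r.1 : Int) = false := by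
            by_cases hrn : r.1 < lines.length
            · rw [pvFlagB_lt lines r.1 hrn]; exact hr3 hrn
            · exact pvFlagB_ge lines _ (by omega)
          have hst2 : pvStepB lines
              ((if r.2.length ≥ 2 then
                  out ++ [((i : Int), (r.1 : Int), PySem.Str.join "\n" r.2)] else out), none)
              (r.1 : Int) =
              ((if r.2.length ≥ 2 then
                  out ++ [((i : Int), (r.1 : Int), PySem.Str.join "\n" r.2)] else out), none) := by
            simp [pvStepB, hf]
          rw [hst2]
        · have hpf : pvIsPipe lines[i] = false := by simpa using hp
          rw [pvOuterA]; simp only [hlt, ↓reduceDIte, hpf, Bool.false_eq_true, ↓reduceIte]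
          rw [PySem.List.pyRange_one_cons (by exact_mod_cast by omega : (i : Int) < (lines.length : Int) + 1)]
          rw [List.foldl_cons]
          have hst : pvStepB lines (out, none) (i : Int) = (out, none) := by
            simp [pvStepB, pvFlagB_lt lines i hlt, hpf]
          rw [hst]
          have hcast : (i : Int) + 1 = ((i + 1 : Nat) : Int) := by push_cast; ring
          rw [hcast]
          exact ih (i + 1) out (by omega) (by omega)
      · have hin : i = lines.length := by omega
        subst hin
        rw [pvOuterA]; simp only [lt_irrefl, ↓reduceDIte]
        rw [PySem.List.pyRange_one_cons (by omega : ((lines.length : Nat) : Int) < (lines.length : Int) + 1)]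
        rw [List.foldl_cons]
        have hflag : pvFlagB lines ((lines.length : Nat) : Int) = false :=
          pvFlagB_ge lines _ (le_refl _)
        have hst : pvStepB lines (out, none) ((lines.length : Nat) : Int) = (out, none) := by
          simp [pvStepB, hflag]
        rw [hst, PySem.List.pyRange_one_eq_nil (by omega), List.foldl_nil]

-- ===== VERDICT (by name: the statement is the Claim_ definition above) =====
theorem all_pipe_tables_spec : Claim_equal_all_pipe_tables := by
  intro md _
  unfold Spec_all_pipe_tables all_pipe_tables all_pipe_tables_alt
  simpa using pvMain (PySem.Str.splitlines md) (PySem.Str.splitlines md).length 0 [] (by omega) (by omega)
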